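-- pv_equiv track=rewrite | github.com/hobzy987/PhiDSC-DALI | DALI_Align.py | Reverse_counter
-- ===== SOURCE A (Python) =====
-- def Reverse_counter(string, end_number):
--     counter_list = []
--     string = str(string)
--     end_number = int(end_number)
--     for c in reversed(string):
--         if c.isalpha():
--             counter_list.append(end_number)
--             end_number = end_number - 1
--         else:
--             counter_list.append(0)
--     return counter_list[::-1]
-- ===== SOURCE B (Python) =====
-- def Reverse_counter(string, end_number):
--     string = str(string)
--     end_number = int(end_number)
--     n_alpha = sum(1 for c in string if c.isalpha())
--     out = []
--     k = end_number - n_alpha + 1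
--     for c in string:
--         if c.isalpha():
--             out.append(k)
--             k = k + 1
--         else:
--             out.append(0)
--     return out
-- ===== Notes on version B (the rewrite author's own statement) =====
-- stated objective: simpler
-- what changed: B replaces A's reversed-iteration-then-reverse-the-result scheme with one counting pass to find the number of alphabetic characters and a single forward pass with an ascending counter starting at end_number - n_alpha + 1, building the output in order with no reversal.
import Mathlib
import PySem

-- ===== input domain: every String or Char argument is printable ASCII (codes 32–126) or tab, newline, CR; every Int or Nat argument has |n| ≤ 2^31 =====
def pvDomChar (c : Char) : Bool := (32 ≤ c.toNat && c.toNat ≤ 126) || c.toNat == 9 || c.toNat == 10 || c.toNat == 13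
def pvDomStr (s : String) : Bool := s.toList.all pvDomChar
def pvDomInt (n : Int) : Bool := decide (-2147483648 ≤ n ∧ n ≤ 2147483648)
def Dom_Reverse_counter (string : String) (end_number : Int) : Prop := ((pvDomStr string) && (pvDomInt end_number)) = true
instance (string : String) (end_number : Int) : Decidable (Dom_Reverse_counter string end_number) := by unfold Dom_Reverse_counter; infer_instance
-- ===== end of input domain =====

-- B builds the list in one forward pass from end_number - n_alpha + 1 with no reversal (objective: simpler).

-- ===== PORT A =====
-- the for-loop over reversed(string), mutating counter_list (acc) and end_number (n)
def pvALoop : List Char → List Int → Int → List Int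
  | [], acc, _ => acc
  | c :: cs, acc, n =>
      if PySem.Chars.isalpha c then pvALoop cs (acc ++ [n]) (n - 1)
      else pvALoop cs (acc ++ [0]) n

def Reverse_counter (string : String) (end_number : Int) : List Int :=
  -- str(string)/int(end_number) are identities here; counter_list[::-1] is List.reverse
  (pvALoop string.toList.reverse [] end_number).reverse

-- ===== PORT B =====
-- forward loop: alpha chars get k (then k+1), others 0
def pvBLoop : List Char → Int → List Int
  | [], _ => []
  | c :: cs, k =>
      if PySem.Chars.isalpha c then k :: pvBLoop cs (k + 1)
      else 0 :: pvBLoop cs k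

def Reverse_counter_alt (string : String) (end_number : Int) : List Int :=
  let nAlpha : Int := (string.toList.countP (fun c => PySem.Chars.isalpha c) : Nat)
  pvBLoop string.toList (end_number - nAlpha + 1)

-- ===== PRECONDITION & SPEC =====
def Spec_Reverse_counter (string : String) (end_number : Int) (out : List Int) : Prop := out = Reverse_counter_alt string end_number
instance (string : String) (end_number : Int) (out : List Int) : Decidable (Spec_Reverse_counter string end_number out) := by unfold Spec_Reverse_counter; infer_instance

-- ===== CLAIM (what is proved, stated in full; the proofs are below) =====
def Claim_equal_Reverse_counter : Prop := ∀ (string : String) (end_number : Int), Dom_Reverse_counter string end_number → Spec_Reverse_counter string end_number (Reverse_counter string end_number)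

-- ===== LEMMAS AND PROOFS =====

-- accumulator-free form of A's loop
def pvAGo : List Char → Int → List Int
  | [], _ => []
  | c :: cs, n =>
      if PySem.Chars.isalpha c then n :: pvAGo cs (n - 1)
      else 0 :: pvAGo cs n

theorem pvALoop_eq_acc (l : List Char) : ∀ (acc : List Int) (n : Int),
    pvALoop l acc n = acc ++ pvAGo l n := by
  induction l with
  | nil => intro acc n; simp [pvALoop, pvAGo]
  | cons c cs ih =>
      intro acc n
      by_cases h : PySem.Chars.isalpha c = true <;>
        simp [pvALoop, pvAGo, h, ih]

theorem pvBLoop_append (xs : List Char) (c : Char) : ∀ (k : Int),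
    pvBLoop (xs ++ [c]) k =
      pvBLoop xs k ++
        [if PySem.Chars.isalpha c then k + (xs.countP (fun c => PySem.Chars.isalpha c) : Nat) else 0] := by
  induction xs with
  | nil => intro k; by_cases h : PySem.Chars.isalpha c = true <;> simp [pvBLoop, h]
  | cons x xs ih =>
      intro k
      by_cases hx : PySem.Chars.isalpha x = true <;>
        by_cases h : PySem.Chars.isalpha c = true <;>
          simp [pvBLoop, hx, h, ih, List.countP_cons] <;> push_cast <;> omega

theorem pvAGo_reverse (l : List Char) : ∀ (n : Int),
    (pvAGo l n).reverse =
      pvBLoop l.reverse (n - (l.countP (fun c => PySem.Chars.isalpha c) : Nat) + 1) := by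
  induction l with
  | nil => intro n; simp [pvAGo, pvBLoop]
  | cons c cs ih =>
      intro n
      by_cases h : PySem.Chars.isalpha c = true
      · simp only [pvAGo, h, if_pos, List.reverse_cons, ih, List.countP_cons, pvBLoop_append]
        simp [List.countP_reverse]
        constructor
        · congr 1; push_cast; ring
        · push_cast; ring
      · have hc : PySem.Chars.isalpha c = false := by simpa using h
        simp [pvAGo, hc, pvBLoop_append, List.countP_cons, List.countP_reverse, ih]

-- ===== VERDICT (by name: the statement is the Claim_ definition above) =====
theorem Reverse_counter_spec : Claim_equal_Reverse_counter := by
  intro s n _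
  unfold Spec_Reverse_counter Reverse_counter Reverse_counter_alt
  rw [pvALoop_eq_acc, List.nil_append, pvAGo_reverse]
  simp [List.countP_reverse]
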